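-- pv_equiv track=rewrite | github.com/jayprophit/aetherium | aetherium/platform/backend/ai_productivity_suite/suite_manager.py | _check_tool_access
-- ===== SOURCE A (Python) =====
-- from typing import Dict, Any, Optional, List
--
-- def _check_tool_access(category: str, permissions: List[str]) -> bool:
--     """Check if user has access to specific tool category"""
--     # Basic permission mapping - can be enhanced
--     permission_map = {
--         "research": ["ai_suite_research", "ai_suite_all"],
--         "creative": ["ai_suite_creative", "ai_suite_all"],
--         "content": ["ai_suite_content", "ai_suite_all"],
--         "business": ["ai_suite_business", "ai_suite_all"],
--         "translation": ["ai_suite_translation", "ai_suite_all"],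
--         "development": ["ai_suite_development", "ai_suite_all"],
--         "experimental": ["ai_suite_experimental", "ai_suite_all"]
--     }
--
--     required_permissions = permission_map.get(category.lower(), [])
--     return any(perm in permissions for perm in required_permissions)
-- ===== SOURCE B (Python) =====
-- def _check_tool_access(category, permissions):
--     """Check if user has access to specific tool category"""
--     cat = category.lower()
--     if cat not in ("research", "creative", "content", "business",
--                    "translation", "development", "experimental"):
--         return False
--     for perm in permissions:
--         if perm.startswith("ai_suite_") and perm[9:] in (cat, "all"):
--             return True
--     return False
-- ===== Notes on version B (the rewrite author's own statement) =====
-- stated objective: alternative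
-- what changed: Inverts the scan direction: instead of building a required-permission list from a dict and membership-testing each against permissions, B makes a single pass over the user's permissions, parsing each string by stripping the 'ai_suite_' prefix and comparing the suffix to the (validated) category or 'all'.
import Mathlib
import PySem

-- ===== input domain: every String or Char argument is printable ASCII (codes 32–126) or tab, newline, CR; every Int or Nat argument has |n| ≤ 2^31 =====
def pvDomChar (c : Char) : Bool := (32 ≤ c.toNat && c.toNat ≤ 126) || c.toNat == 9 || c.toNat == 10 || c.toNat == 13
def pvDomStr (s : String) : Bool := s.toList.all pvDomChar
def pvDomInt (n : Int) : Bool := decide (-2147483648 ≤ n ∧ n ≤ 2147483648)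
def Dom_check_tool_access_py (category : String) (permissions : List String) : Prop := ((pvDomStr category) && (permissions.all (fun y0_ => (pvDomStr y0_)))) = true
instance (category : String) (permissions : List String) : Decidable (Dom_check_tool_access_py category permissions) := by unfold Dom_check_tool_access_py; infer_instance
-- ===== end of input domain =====

-- B replaces A's dict-of-required-permissions + any() membership scan by one pass over the
-- user's permission list, parsing each permission string (strip "ai_suite_" prefix, compare the
-- suffix to the validated category or "all"); same return value everywhere (objective: alternative).

-- ===== PORT A =====
-- Port of A: literal permission_map dict, getD on lowered category, any-membership scan.
def check_tool_access_py (category : String) (permissions : List String) : Bool :=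
  let permission_map : PySem.Dict String (List String) := PySem.Dict.ofList
    [("research", ["ai_suite_research", "ai_suite_all"]),
     ("creative", ["ai_suite_creative", "ai_suite_all"]),
     ("content", ["ai_suite_content", "ai_suite_all"]),
     ("business", ["ai_suite_business", "ai_suite_all"]),
     ("translation", ["ai_suite_translation", "ai_suite_all"]),
     ("development", ["ai_suite_development", "ai_suite_all"]),
     ("experimental", ["ai_suite_experimental", "ai_suite_all"])]
  let required_permissions := permission_map.getD (PySem.Str.lower category) []
  required_permissions.any (fun perm => permissions.contains perm)

-- ===== PORT B =====
-- Port of B's for-loop with early return: scan permissions, parse each by prefix/suffix.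
def ctaLoop (cat : String) : List String → Bool
  | [] => false
  | perm :: rest =>
    if PySem.Str.startswith perm "ai_suite_" &&
       (PySem.Str.slice perm (some 9) none == cat || PySem.Str.slice perm (some 9) none == "all")
    then true
    else ctaLoop cat rest

def check_tool_access_py_alt (category : String) (permissions : List String) : Bool :=
  let cat := PySem.Str.lower category
  if ¬ (["research", "creative", "content", "business",
         "translation", "development", "experimental"].contains cat) then
    false
  else
    ctaLoop cat permissions

-- ===== PRECONDITION & SPEC =====
def Spec_check_tool_access_py (category : String) (permissions : List String) (out : Bool) : Prop := out = check_tool_access_py_alt category permissions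
instance (category : String) (permissions : List String) (out : Bool) : Decidable (Spec_check_tool_access_py category permissions out) := by unfold Spec_check_tool_access_py; infer_instance

-- ===== CLAIM (what is proved, stated in full; the proofs are below) =====
def Claim_equal_check_tool_access_py : Prop := ∀ (category : String) (permissions : List String), Dom_check_tool_access_py category permissions → Spec_check_tool_access_py category permissions (check_tool_access_py category permissions)

-- ===== LEMMAS AND PROOFS =====

-- One permission string passes B's parse test iff it IS "ai_suite_" ++ x (for any suffix x).
theorem parse_eq (x perm : String) :
    (PySem.Str.startswith perm "ai_suite_" && (PySem.Str.slice perm (some 9) none == x))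
      = (perm == ("ai_suite_" ++ x)) := by
  rw [Bool.eq_iff_iff]
  simp only [Bool.and_eq_true, beq_iff_eq, PySem.Str.startswith_eq, PySem.Chars.startswith_iff]
  constructor
  · rintro ⟨⟨t, ht⟩, hs⟩
    have hx : x.toList = perm.toList.drop 9 := by
      rw [← hs]; simp [PySem.List.slice_from]
    have hdrop : perm.toList.drop 9 = t := by
      rw [← ht]
      exact List.drop_left' (by decide)
    apply String.toList_inj.mp
    simp only [String.toList_append, hx, hdrop, ht]
  · intro h
    subst h
    refine ⟨⟨x.toList, by simp⟩, ?_⟩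
    apply String.toList_inj.mp
    simp [PySem.List.slice_from]
    -- (simp closes the drop-of-append goal)

theorem loop_eq (cat : String) (permissions : List String) :
    ctaLoop cat permissions
      = (permissions.contains ("ai_suite_" ++ cat) || permissions.contains "ai_suite_all") := by
  induction permissions with
  | nil => rfl
  | cons p rest ih =>
    simp only [ctaLoop, List.contains_cons]
    rw [Bool.and_or_distrib_left] at *
    rw [show (PySem.Str.startswith p "ai_suite_" && (PySem.Str.slice p (some 9) none == cat))
        = (p == ("ai_suite_" ++ cat)) from parse_eq cat p,
        show (PySem.Str.startswith p "ai_suite_" && (PySem.Str.slice p (some 9) none == "all"))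
        = (p == ("ai_suite_" ++ "all")) from parse_eq "all" p]
    by_cases h1 : p = "ai_suite_" ++ cat
    · simp [h1]
    · by_cases h2 : p = "ai_suite_all"
      · simp [h2, show ("ai_suite_" ++ "all" : String) = "ai_suite_all" from rfl]
      · have h1' : ("ai_suite_" ++ cat == p) = false := by
          simp only [beq_eq_false_iff_ne]; exact fun h => h1 h.symm
        have h2' : (("ai_suite_all" : String) == p) = false := by
          simp only [beq_eq_false_iff_ne]; exact fun h => h2 h.symm
        simp [h1, h2, h1', h2', ih,
          show ("ai_suite_" ++ "all" : String) = "ai_suite_all" from rfl]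

-- A's dict lookup + any-scan equals the validity-gated two membership tests (from the prior proof).
theorem body_eq (c : String) (permissions : List String) :
    (((PySem.Dict.ofList
      [("research", ["ai_suite_research", "ai_suite_all"]),
       ("creative", ["ai_suite_creative", "ai_suite_all"]),
       ("content", ["ai_suite_content", "ai_suite_all"]),
       ("business", ["ai_suite_business", "ai_suite_all"]),
       ("translation", ["ai_suite_translation", "ai_suite_all"]),
       ("development", ["ai_suite_development", "ai_suite_all"]),
       ("experimental", ["ai_suite_experimental", "ai_suite_all"])]).getD c []).any
        (fun perm => permissions.contains perm))
    = (if ¬ (["research", "creative", "content", "business",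
              "translation", "development", "experimental"].contains c) then
        false
      else
        permissions.contains ("ai_suite_" ++ c) || permissions.contains "ai_suite_all") := by
  have hmk : PySem.Dict.ofList
      [("research", ["ai_suite_research", "ai_suite_all"]),
       ("creative", ["ai_suite_creative", "ai_suite_all"]),
       ("content", ["ai_suite_content", "ai_suite_all"]),
       ("business", ["ai_suite_business", "ai_suite_all"]),
       ("translation", ["ai_suite_translation", "ai_suite_all"]),
       ("development", ["ai_suite_development", "ai_suite_all"]),
       ("experimental", ["ai_suite_experimental", "ai_suite_all"])] = PySem.Dict.mk
      [("research", ["ai_suite_research", "ai_suite_all"]),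
       ("creative", ["ai_suite_creative", "ai_suite_all"]),
       ("content", ["ai_suite_content", "ai_suite_all"]),
       ("business", ["ai_suite_business", "ai_suite_all"]),
       ("translation", ["ai_suite_translation", "ai_suite_all"]),
       ("development", ["ai_suite_development", "ai_suite_all"]),
       ("experimental", ["ai_suite_experimental", "ai_suite_all"])] := by rfl
  by_cases h1 : c = "research"
  · subst h1; simp [hmk, PySem.Dict.getD_eq_get?_getD, PySem.Dict.get?]
  by_cases h2 : c = "creative"
  · subst h2; simp [hmk, PySem.Dict.getD_eq_get?_getD, PySem.Dict.get?]
  by_cases h3 : c = "content"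
  · subst h3; simp [hmk, PySem.Dict.getD_eq_get?_getD, PySem.Dict.get?]
  by_cases h4 : c = "business"
  · subst h4; simp [hmk, PySem.Dict.getD_eq_get?_getD, PySem.Dict.get?]
  by_cases h5 : c = "translation"
  · subst h5; simp [hmk, PySem.Dict.getD_eq_get?_getD, PySem.Dict.get?]
  by_cases h6 : c = "development"
  · subst h6; simp [hmk, PySem.Dict.getD_eq_get?_getD, PySem.Dict.get?]
  by_cases h7 : c = "experimental"
  · subst h7; simp [hmk, PySem.Dict.getD_eq_get?_getD, PySem.Dict.get?]
  · simp [hmk, PySem.Dict.getD_eq_get?_getD, PySem.Dict.get?, h1, h2, h3, h4, h5, h6, h7,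
      Ne.symm h1, Ne.symm h2, Ne.symm h3, Ne.symm h4, Ne.symm h5, Ne.symm h6, Ne.symm h7]

-- ===== VERDICT (by name: the statement is the Claim_ definition above) =====
theorem check_tool_access_py_spec : Claim_equal_check_tool_access_py := by
  intro category permissions _
  unfold Spec_check_tool_access_py check_tool_access_py check_tool_access_py_alt
  simp only [loop_eq]
  exact body_eq (PySem.Str.lower category) permissions
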